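-- pv_equiv track=rewrite | github.com/nfernan1/speedreader | Google Drive/Documents/Class/2013/ICS 33/Solutions copy/inlabexam1students/Lab 2/OuMingxin/exam.py | find_influencers
-- ===== SOURCE A (Python) =====
-- from math        import ceil
-- from collections import defaultdict # Use dict or defaultdict
--
-- def find_influencers(graph):
--     pre_infl = defaultdict(int)
--     for k,v in graph.items():
--         pre_infl[k] = len(v) - ceil(len(v)/2)
--     infl = dict(pre_infl)
--
-- #     for k,v in dict(infl).items():
-- #         cand.append((v,len(graph[k]),k))
--     while True:
--         cand = []
--         for k,v in infl.items():
--             if v>=0: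
--                 cand.append((v,len(graph[k]),k))
--         if cand == []:
--             break
--         removed_f = sorted(cand).pop(0)[2]
--         to_decrement = graph[removed_f]
--         infl.pop(removed_f)
--         for dec in to_decrement:
--             try:
--                 infl[dec]= infl[dec]-1
--             except:
--                 pass
--     answer = {i for i in infl.keys()}
--     return answer
-- ===== SOURCE B (Python) =====
-- def _push(pending, item):
--     # insert item into the ascending-sorted event queue (linear scan)
--     i = 0
--     n = len(pending)
--     while i < n and pending[i] < item:
--         i += 1
--     pending.insert(i, item)
--
-- def find_influencers(graph):
--     # Event-driven priority queue with lazy deletion: build the (influence, degree, node)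
--     # queue once, keep it sorted under decrement re-pushes, and skip stale entries,
--     # instead of rebuilding and fully sorting a candidate list every round.
--     infl = {}
--     pending = []
--     for k, v in graph.items():
--         d = len(v)
--         f = d // 2          # len(v) - ceil(len(v)/2)
--         infl[k] = f
--         _push(pending, (f, d, k))
--     while pending:
--         f, d, k = pending.pop(0)
--         if infl.get(k) != f:
--             continue        # stale entry: k already removed or since decremented
--         del infl[k]
--         for n in graph[k]:
--             nf = infl.get(n)
--             if nf is not None:
--                 nf -= 1
--                 infl[n] = nf
--                 if nf >= 0:
--                     _push(pending, (nf, len(graph[n]), n))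
--     return set(infl)
-- ===== Notes on version B (the rewrite author's own statement) =====
-- stated objective: faster
-- what changed: B replaces A's per-round rebuild-and-sort of the full candidate list by an event-driven priority queue built once: a sorted pending list of (influence, degree, node) entries maintained incrementally under decrement re-pushes, with stale entries deleted lazily when popped, so no per-round scan or sort of all nodes remains.
import Mathlib
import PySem

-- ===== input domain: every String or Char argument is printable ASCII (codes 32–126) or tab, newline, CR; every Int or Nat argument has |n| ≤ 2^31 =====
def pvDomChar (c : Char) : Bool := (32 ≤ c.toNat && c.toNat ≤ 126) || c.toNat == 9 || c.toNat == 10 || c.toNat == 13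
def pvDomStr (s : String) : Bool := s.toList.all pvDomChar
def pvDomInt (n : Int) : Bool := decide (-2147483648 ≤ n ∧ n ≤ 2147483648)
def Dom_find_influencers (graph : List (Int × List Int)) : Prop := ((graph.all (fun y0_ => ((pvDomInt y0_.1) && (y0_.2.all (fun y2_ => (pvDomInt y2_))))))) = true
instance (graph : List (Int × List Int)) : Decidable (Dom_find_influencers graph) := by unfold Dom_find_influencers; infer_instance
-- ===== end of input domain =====

-- B replaces A's per-round rebuild-and-sort of the candidate list by an event-driven
-- sorted pending queue with lazy deletion of stale entries (objective: faster).

-- ===== PORT A =====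
-- math.ceil(len(v)/2); exact because the float len(v)/2 is exact for any real list length
def pvCeilHalf (n : Int) : Int := -(PySem.Int.floordiv (-n) 2)

-- Python's '<' on int triples is lexicographic: sorted(cand) sorts by this key
def pvKey3 (t : Int × Int × Int) : Lex (Int × Lex (Int × Int)) := toLex (t.1, toLex (t.2.1, t.2.2))

-- the 'cand' list built by A's inner for-loop
def pvCandA (g : PySem.Dict Int (List Int)) (infl : PySem.Dict Int Int) : List (Int × Int × Int) :=
  infl.items.foldl
    (fun acc kv => if 0 ≤ kv.2 then acc ++ [(kv.2, ((g.getD kv.1 []).length : Int), kv.1)] else acc) []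

-- 'try: infl[dec] = infl[dec]-1 except: pass'
def pvDecA (d : PySem.Dict Int Int) (n : Int) : PySem.Dict Int Int :=
  if d.contains n then d.insert n (d.getD n 0 - 1) else d

theorem pvDecA_length (d : PySem.Dict Int Int) (n : Int) :
    (pvDecA d n).items.length = d.items.length := by
  unfold pvDecA
  split
  · rename_i h
    simp [PySem.Dict.insert, h]
  · rfl

theorem pvFoldDecA_length (l : List Int) (d : PySem.Dict Int Int) :
    (l.foldl pvDecA d).items.length = d.items.length := by
  induction l generalizing d with
  | nil => rfl
  | cons x l ih => simp [List.foldl_cons, ih, pvDecA_length]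

theorem pvCandA_eq (g : PySem.Dict Int (List Int)) (infl : PySem.Dict Int Int) :
    pvCandA g infl =
      (infl.items.filter (fun kv => decide (0 ≤ kv.2))).map
        (fun kv => (kv.2, ((g.getD kv.1 []).length : Int), kv.1)) := by
  unfold pvCandA
  rw [PySem.List.foldl_append_ite (p := fun kv : Int × Int => 0 ≤ kv.2)
      (f := fun kv : Int × Int => (kv.2, ((g.getD kv.1 []).length : Int), kv.1))]
  simp

theorem pvMem_candA_key (g : PySem.Dict Int (List Int)) (infl : PySem.Dict Int Int)
    (t : Int × Int × Int) (ht : t ∈ pvCandA g infl) : t.2.2 ∈ infl.items.map (·.1) := by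
  rw [pvCandA_eq] at ht
  simp only [List.mem_map] at ht ⊢
  obtain ⟨kv, hkv, rfl⟩ := ht
  exact ⟨kv, List.mem_of_mem_filter hkv, rfl⟩

theorem pvErase_length_lt (d : PySem.Dict Int Int) (k : Int)
    (h : k ∈ d.items.map (·.1)) : (d.erase k).items.length < d.items.length := by
  simp only [PySem.Dict.erase]
  rw [List.length_filter_lt_length_iff_exists]
  simp only [List.mem_map] at h
  obtain ⟨p, hp, rfl⟩ := h
  exact ⟨p, hp, by simp⟩

theorem pvHeadD_mem {α : Type} (l : List α) (h : l ≠ []) (d : α) : l.headD d ∈ l := by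
  cases l with
  | nil => exact absurd rfl h
  | cons x xs => simp

-- A's while-loop; one call per iteration
def pvLoopA (g : PySem.Dict Int (List Int)) (infl : PySem.Dict Int Int) : List Int :=
  let cand := pvCandA g infl
  if hc : cand = [] then
    PySem.Set.ofList infl.keys
  else
    let removed := ((PySem.List.sorted cand pvKey3).headD (0, 0, 0)).2.2
    let to_dec := g.getD removed []   -- graph[removed_f]: removed_f is always a key of graph here
    pvLoopA g (to_dec.foldl pvDecA (infl.erase removed))
termination_by infl.items.length
decreasing_by
  rw [pvFoldDecA_length]
  apply pvErase_length_lt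
  apply pvMem_candA_key g infl
  have hs : PySem.List.sorted cand pvKey3 ≠ [] := by
    simpa [PySem.List.sorted_eq_nil_iff] using hc
  have := pvHeadD_mem _ hs (0, 0, 0)
  exact ((PySem.List.sorted_perm cand pvKey3 false).mem_iff).mp this

def find_influencers (graph : List (Int × List Int)) : List Int :=
  let g := PySem.Dict.ofList graph
  -- pre_infl[k] = len(v) - ceil(len(v)/2); infl = dict(pre_infl) is a copy with the same items
  let infl := g.items.foldl
    (fun d kv => d.insert kv.1 ((kv.2.length : Int) - pvCeilHalf (kv.2.length : Int)))
    PySem.Dict.empty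
  pvLoopA g infl

-- ===== PORT B =====
-- _push: insert item into the ascending-sorted queue before the first element not < item
def pvPush (pending : List (Int × Int × Int)) (item : Int × Int × Int) : List (Int × Int × Int) :=
  match pending with
  | [] => [item]
  | x :: xs => if pvKey3 x < pvKey3 item then x :: pvPush xs item else item :: x :: xs

-- one neighbour: 'nf = infl.get(n); if nf is not None: nf -= 1; infl[n] = nf; if nf >= 0: _push(...)'
def pvDecPush (g : PySem.Dict Int (List Int))
    (s : PySem.Dict Int Int × List (Int × Int × Int)) (n : Int) :
    PySem.Dict Int Int × List (Int × Int × Int) :=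
  match s.1.get? n with
  | none => s
  | some f =>
      (s.1.insert n (f - 1),
       if 0 ≤ f - 1 then pvPush s.2 (f - 1, ((g.getD n []).length : Int), n) else s.2)

theorem pvDecPush_fst_length (g : PySem.Dict Int (List Int))
    (s : PySem.Dict Int Int × List (Int × Int × Int)) (n : Int) :
    (pvDecPush g s n).1.items.length = s.1.items.length := by
  unfold pvDecPush
  cases h : s.1.get? n with
  | none => rfl
  | some f =>
      have hc : s.1.contains n = true := by
        rw [PySem.Dict.contains_eq_isSome_get?, h]; rfl
      simp [PySem.Dict.insert, hc]

theorem pvFoldDecPush_fst_length (g : PySem.Dict Int (List Int)) (l : List Int)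
    (s : PySem.Dict Int Int × List (Int × Int × Int)) :
    (l.foldl (pvDecPush g) s).1.items.length = s.1.items.length := by
  induction l generalizing s with
  | nil => rfl
  | cons x l ih => rw [List.foldl_cons, ih, pvDecPush_fst_length]

theorem pvGet?_mem_keys (d : PySem.Dict Int Int) (k : Int) (f : Int)
    (h : d.get? k = some f) : k ∈ d.items.map (·.1) :=
  List.mem_map.mpr ⟨(k, f), PySem.Dict.mem_items_of_get?_eq_some d h, rfl⟩

-- Source B's while-loop; one call per pop
def pvLoopB (g : PySem.Dict Int (List Int)) (infl : PySem.Dict Int Int)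
    (pending : List (Int × Int × Int)) : List Int :=
  match pending with
  | [] => PySem.Set.ofList infl.keys
  | e :: rest =>
      if h : infl.get? e.2.2 = some e.1 then
        let s := (g.getD e.2.2 []).foldl (pvDecPush g) (infl.erase e.2.2, rest)
        pvLoopB g s.1 s.2
      else
        pvLoopB g infl rest
termination_by (infl.items.length, pending.length)
decreasing_by
  · apply Prod.Lex.left
    rw [pvFoldDecPush_fst_length]
    exact pvErase_length_lt infl e.2.2 (pvGet?_mem_keys infl e.2.2 e.1 h)
  · apply Prod.Lex.right
    simp

def find_influencers_alt (graph : List (Int × List Int)) : List Int :=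
  let g := PySem.Dict.ofList graph
  -- one loop builds infl (k ↦ d // 2) and the initial sorted pending queue
  let s := g.items.foldl
    (fun (s : PySem.Dict Int Int × List (Int × Int × Int)) kv =>
      (s.1.insert kv.1 (PySem.Int.floordiv (kv.2.length : Int) 2),
       pvPush s.2 (PySem.Int.floordiv (kv.2.length : Int) 2, (kv.2.length : Int), kv.1)))
    (PySem.Dict.empty, [])
  pvLoopB g s.1 s.2

-- ===== PRECONDITION & SPEC =====
def Spec_find_influencers (graph : List (Int × List Int)) (out : List Int) : Prop := out = find_influencers_alt graph
instance (graph : List (Int × List Int)) (out : List Int) : Decidable (Spec_find_influencers graph out) := by unfold Spec_find_influencers; infer_instance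

-- ===== CLAIM (what is proved, stated in full; the proofs are below) =====
def Claim_equal_find_influencers : Prop := ∀ (graph : List (Int × List Int)), Dom_find_influencers graph → Spec_find_influencers graph (find_influencers graph)

-- ===== LEMMAS AND PROOFS =====

-- the simulation invariant: infl has unique keys, pending is sorted, every pending entry
-- carries the true degree and a nonnegative influence, and every live candidate of infl
-- has a fresh entry in pending
def pvInv (g : PySem.Dict Int (List Int)) (infl : PySem.Dict Int Int)
    (pending : List (Int × Int × Int)) : Prop :=
  infl.keys.Nodup ∧
  pending.Pairwise (fun a b => pvKey3 a ≤ pvKey3 b) ∧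
  (∀ e ∈ pending, e.2.1 = ((g.getD e.2.2 []).length : Int) ∧ 0 ≤ e.1) ∧
  (∀ kv ∈ infl.items, 0 ≤ kv.2 → (kv.2, ((g.getD kv.1 []).length : Int), kv.1) ∈ pending)

theorem pvPush_mem (p : List (Int × Int × Int)) (i a : Int × Int × Int) :
    a ∈ pvPush p i ↔ a ∈ p ∨ a = i := by
  induction p with
  | nil => simp [pvPush, or_comm]
  | cons x xs ih =>
      unfold pvPush
      split
      · simp [ih]; tauto
      · simp; tauto

theorem pvPush_pairwise (p : List (Int × Int × Int)) (i : Int × Int × Int)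
    (h : p.Pairwise (fun a b => pvKey3 a ≤ pvKey3 b)) :
    (pvPush p i).Pairwise (fun a b => pvKey3 a ≤ pvKey3 b) := by
  induction p with
  | nil => simp [pvPush]
  | cons x xs ih =>
      rw [List.pairwise_cons] at h
      unfold pvPush
      split
      · rename_i hlt
        rw [List.pairwise_cons]
        refine ⟨?_, ih h.2⟩
        intro a ha
        rcases (pvPush_mem xs i a).mp ha with ha' | rfl
        · exact h.1 a ha'
        · exact le_of_lt hlt
      · rename_i hlt
        rw [List.pairwise_cons]
        refine ⟨?_, List.pairwise_cons.mpr h⟩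
        intro a ha
        rcases List.mem_cons.mp ha with rfl | ha'
        · exact not_lt.mp hlt
        · exact le_trans (not_lt.mp hlt) (h.1 a ha')

-- one decrement step preserves the invariant
theorem pvDecPush_inv (g : PySem.Dict Int (List Int))
    (s : PySem.Dict Int Int × List (Int × Int × Int)) (n : Int)
    (h : pvInv g s.1 s.2) : pvInv g (pvDecPush g s n).1 (pvDecPush g s n).2 := by
  obtain ⟨hnd, hsort, hprops, hfresh⟩ := h
  cases hg : s.1.get? n with
  | none =>
      simp only [pvDecPush, hg]
      exact ⟨hnd, hsort, hprops, hfresh⟩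
  | some f =>
      have hc : s.1.contains n = true := by
        rw [PySem.Dict.contains_eq_isSome_get?, hg]; rfl
      simp only [pvDecPush, hg]
      refine ⟨?_, ?_, ?_, ?_⟩
      · rw [PySem.Dict.keys_insert_of_contains _ _ hc]; exact hnd
      · split
        · exact pvPush_pairwise _ _ hsort
        · exact hsort
      · intro e he
        split at he
        · rcases (pvPush_mem _ _ e).mp he with he' | rfl
          · exact hprops e he'
          · rename_i h0
            exact ⟨rfl, h0⟩
        · exact hprops e he
      · intro kv hkv hkv0
        rcases (PySem.Dict.mem_items_insert _ _ _ _).mp hkv with rfl | ⟨hmem, hne⟩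
        · simp only [hkv0, if_pos]
          exact (pvPush_mem _ _ _).mpr (Or.inr rfl)
        · have := hfresh kv hmem hkv0
          split
          · exact (pvPush_mem _ _ _).mpr (Or.inl this)
          · exact this

theorem pvFoldDecPush_inv (g : PySem.Dict Int (List Int)) (l : List Int)
    (s : PySem.Dict Int Int × List (Int × Int × Int))
    (h : pvInv g s.1 s.2) :
    pvInv g (l.foldl (pvDecPush g) s).1 (l.foldl (pvDecPush g) s).2 := by
  induction l generalizing s with
  | nil => exact h
  | cons x l ih => exact ih _ (pvDecPush_inv g s x h)

-- erasing the popped fresh node preserves the invariant w.r.t. the rest of the queue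
theorem pvErase_inv (g : PySem.Dict Int (List Int)) (infl : PySem.Dict Int Int)
    (e : Int × Int × Int) (rest : List (Int × Int × Int))
    (h : pvInv g infl (e :: rest)) :
    pvInv g (infl.erase e.2.2) rest := by
  obtain ⟨hnd, hsort, hprops, hfresh⟩ := h
  refine ⟨?_, (List.pairwise_cons.mp hsort).2, fun x hx => hprops x (List.mem_cons_of_mem _ hx), ?_⟩
  · have : (infl.erase e.2.2).keys.Sublist infl.keys := by
      simp only [PySem.Dict.erase, PySem.Dict.keys]
      exact List.filter_sublist.map _
    exact this.nodup hnd
  · intro kv hkv hkv0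
    simp only [PySem.Dict.erase] at hkv
    have hmem := List.mem_of_mem_filter hkv
    have hne : kv.1 ≠ e.2.2 := by
      have := List.of_mem_filter hkv
      simpa using this
    have := hfresh kv hmem hkv0
    rcases List.mem_cons.mp this with heq | h'
    · subst heq
      exact absurd rfl hne
    · exact h'

-- a stale popped entry can be dropped
theorem pvStale_inv (g : PySem.Dict Int (List Int)) (infl : PySem.Dict Int Int)
    (e : Int × Int × Int) (rest : List (Int × Int × Int))
    (h : pvInv g infl (e :: rest)) (hst : ¬ infl.get? e.2.2 = some e.1) :
    pvInv g infl rest := by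
  obtain ⟨hnd, hsort, hprops, hfresh⟩ := h
  refine ⟨hnd, (List.pairwise_cons.mp hsort).2,
    fun x hx => hprops x (List.mem_cons_of_mem _ hx), ?_⟩
  intro kv hkv hkv0
  have := hfresh kv hkv hkv0
  rcases List.mem_cons.mp this with heq | h'
  · exfalso
    subst heq
    exact hst (PySem.Dict.get?_of_mem_items infl hkv hnd)
  · exact h'

theorem pvKey3_inj (t m : Int × Int × Int) (h : pvKey3 t = pvKey3 m) : t = m := by
  obtain ⟨t1, t2, t3⟩ := t
  obtain ⟨m1, m2, m3⟩ := m
  simp only [pvKey3, toLex_inj, Prod.mk.injEq] at h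
  simp [h.1, h.2.1, h.2.2]

theorem pvSorted_head_spec (cand : List (Int × Int × Int)) (hc : cand ≠ []) :
    ∃ h rest, PySem.List.sorted cand pvKey3 = h :: rest ∧ h ∈ cand ∧
      ∀ x ∈ cand, pvKey3 h ≤ pvKey3 x := by
  cases hs : PySem.List.sorted cand pvKey3 with
  | nil => exact absurd ((PySem.List.sorted_eq_nil_iff cand pvKey3 false).mp hs) hc
  | cons h rest =>
      have hperm := PySem.List.sorted_perm cand pvKey3 false
      rw [hs] at hperm
      refine ⟨h, rest, rfl, hperm.mem_iff.mp (by simp), ?_⟩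
      intro x hx
      have hx' : x ∈ h :: rest := hperm.mem_iff.mpr hx
      rcases List.mem_cons.mp hx' with rfl | hx''
      · exact le_refl _
      · have hpw := PySem.List.sorted_pairwise cand pvKey3
        rw [hs] at hpw
        exact (List.pairwise_cons.mp hpw).1 x hx''

-- every candidate of A has its fresh entry in the queue
theorem pvCand_subset (g : PySem.Dict Int (List Int)) (infl : PySem.Dict Int Int)
    (pending : List (Int × Int × Int)) (h : pvInv g infl pending) :
    ∀ x ∈ pvCandA g infl, x ∈ pending := by
  obtain ⟨hnd, hsort, hprops, hfresh⟩ := h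
  intro x hx
  rw [pvCandA_eq] at hx
  simp only [List.mem_map, List.mem_filter] at hx
  obtain ⟨kv, ⟨hmem, h0⟩, rfl⟩ := hx
  exact hfresh kv hmem (by simpa using h0)

-- a fresh popped entry is A's chosen minimum: the head of sorted(cand)
theorem pvFresh_head (g : PySem.Dict Int (List Int)) (infl : PySem.Dict Int Int)
    (e : Int × Int × Int) (rest : List (Int × Int × Int))
    (hinv : pvInv g infl (e :: rest)) (he : infl.get? e.2.2 = some e.1) :
    pvCandA g infl ≠ [] ∧
    ((PySem.List.sorted (pvCandA g infl) pvKey3).headD (0, 0, 0)) = e := by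
  obtain ⟨hnd, hsort, hprops, hfresh⟩ := hinv
  have hemem : e ∈ pvCandA g infl := by
    have hkv : (e.2.2, e.1) ∈ infl.items := PySem.Dict.mem_items_of_get?_eq_some infl he
    obtain ⟨hd, h0⟩ := hprops e (List.mem_cons_self)
    rw [pvCandA_eq]
    simp only [List.mem_map, List.mem_filter]
    refine ⟨(e.2.2, e.1), ⟨hkv, by simpa using h0⟩, ?_⟩
    obtain ⟨e1, e2, e3⟩ := e
    simp only at hd ⊢
    rw [hd]
  have hc : pvCandA g infl ≠ [] := by
    intro h; rw [h] at hemem; exact absurd hemem (List.not_mem_nil)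
  obtain ⟨h, rest', hs, hmem, hmin⟩ := pvSorted_head_spec (pvCandA g infl) hc
  have hle1 : pvKey3 h ≤ pvKey3 e := hmin e hemem
  have hle2 : pvKey3 e ≤ pvKey3 h := by
    have hp : h ∈ e :: rest := pvCand_subset g infl (e :: rest) ⟨hnd, hsort, hprops, hfresh⟩ h hmem
    rcases List.mem_cons.mp hp with rfl | hp'
    · exact le_refl _
    · exact (List.pairwise_cons.mp hsort).1 h hp'
  refine ⟨hc, ?_⟩
  rw [hs]
  simp only [List.headD_cons]
  exact pvKey3_inj h e (le_antisymm hle1 hle2)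

-- the dict component of B's decrement fold is exactly A's decrement fold
theorem pvDecPush_fst (g : PySem.Dict Int (List Int))
    (s : PySem.Dict Int Int × List (Int × Int × Int)) (n : Int) :
    (pvDecPush g s n).1 = pvDecA s.1 n := by
  unfold pvDecPush pvDecA
  cases hg : s.1.get? n with
  | none =>
      have hc : s.1.contains n = false := by
        rw [PySem.Dict.contains_eq_isSome_get?, hg]; rfl
      rw [if_neg (by simp [hc])]
  | some f =>
      have hc : s.1.contains n = true := by
        rw [PySem.Dict.contains_eq_isSome_get?, hg]; rfl
      rw [if_pos hc, PySem.Dict.getD_of_get?_eq_some _ 0 hg]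

theorem pvFoldDecPush_fst (g : PySem.Dict Int (List Int)) (l : List Int)
    (s : PySem.Dict Int Int × List (Int × Int × Int)) :
    (l.foldl (pvDecPush g) s).1 = l.foldl pvDecA s.1 := by
  induction l generalizing s with
  | nil => rfl
  | cons x l ih =>
      rw [List.foldl_cons, List.foldl_cons, ih, pvDecPush_fst]

-- unfolding lemmas for the two loops
theorem pvLoopA_nil (g : PySem.Dict Int (List Int)) (infl : PySem.Dict Int Int)
    (hc : pvCandA g infl = []) : pvLoopA g infl = PySem.Set.ofList infl.keys := by
  rw [pvLoopA]
  simp only [hc]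
  simp

theorem pvLoopA_cons (g : PySem.Dict Int (List Int)) (infl : PySem.Dict Int Int)
    (hc : ¬ pvCandA g infl = []) :
    pvLoopA g infl =
      pvLoopA g ((g.getD (((PySem.List.sorted (pvCandA g infl) pvKey3).headD (0, 0, 0)).2.2) []).foldl
        pvDecA (infl.erase (((PySem.List.sorted (pvCandA g infl) pvKey3).headD (0, 0, 0)).2.2))) := by
  conv_lhs => rw [pvLoopA]
  simp only [dif_neg hc]

theorem pvLoopB_nil (g : PySem.Dict Int (List Int)) (infl : PySem.Dict Int Int) :
    pvLoopB g infl [] = PySem.Set.ofList infl.keys := by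
  rw [pvLoopB]

theorem pvLoopB_fresh (g : PySem.Dict Int (List Int)) (infl : PySem.Dict Int Int)
    (e : Int × Int × Int) (rest : List (Int × Int × Int))
    (h : infl.get? e.2.2 = some e.1) :
    pvLoopB g infl (e :: rest) =
      pvLoopB g ((g.getD e.2.2 []).foldl (pvDecPush g) (infl.erase e.2.2, rest)).1
        ((g.getD e.2.2 []).foldl (pvDecPush g) (infl.erase e.2.2, rest)).2 := by
  conv_lhs => rw [pvLoopB]
  simp only [dif_pos h]

theorem pvLoopB_stale (g : PySem.Dict Int (List Int)) (infl : PySem.Dict Int Int)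
    (e : Int × Int × Int) (rest : List (Int × Int × Int))
    (h : ¬ infl.get? e.2.2 = some e.1) :
    pvLoopB g infl (e :: rest) = pvLoopB g infl rest := by
  conv_lhs => rw [pvLoopB]
  simp only [dif_neg h]

-- empty queue means no candidates
theorem pvNil_cand (g : PySem.Dict Int (List Int)) (infl : PySem.Dict Int Int)
    (h : pvInv g infl []) : pvCandA g infl = [] := by
  obtain ⟨_, _, _, hfresh⟩ := h
  rw [pvCandA_eq]
  rw [List.map_eq_nil_iff, List.filter_eq_nil_iff]
  intro kv hkv
  simp only [decide_eq_true_eq]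
  intro h0
  exact absurd (hfresh kv hkv h0) (List.not_mem_nil)

-- the simulation: under the invariant, B's lazy-deletion loop computes A's loop
theorem pvSim (g : PySem.Dict Int (List Int)) :
    ∀ N1 : Nat, ∀ infl : PySem.Dict Int Int, infl.items.length ≤ N1 →
    ∀ N2 : Nat, ∀ pending : List (Int × Int × Int), pending.length ≤ N2 →
    pvInv g infl pending → pvLoopB g infl pending = pvLoopA g infl := by
  intro N1
  induction N1 with
  | zero =>
      intro infl hlen N2
      have hitems : infl.items = [] := List.eq_nil_of_length_eq_zero (Nat.le_zero.mp hlen)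
      induction N2 with
      | zero =>
          intro pending hp hinv
          have : pending = [] := List.eq_nil_of_length_eq_zero (Nat.le_zero.mp hp)
          subst this
          rw [pvLoopB_nil, pvLoopA_nil g infl (pvNil_cand g infl hinv)]
      | succ N2 ih =>
          intro pending hp hinv
          cases pending with
          | nil =>
              rw [pvLoopB_nil, pvLoopA_nil g infl (pvNil_cand g infl hinv)]
          | cons e rest =>
              have hst : ¬ infl.get? e.2.2 = some e.1 := by
                intro h
                have := PySem.Dict.mem_items_of_get?_eq_some infl h
                rw [hitems] at this
                exact absurd this (List.not_mem_nil)
              rw [pvLoopB_stale g infl e rest hst]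
              exact ih rest (by simpa using Nat.le_of_succ_le_succ hp)
                (pvStale_inv g infl e rest hinv hst)
  | succ N1 ihA =>
      intro infl hlen N2
      induction N2 with
      | zero =>
          intro pending hp hinv
          have : pending = [] := List.eq_nil_of_length_eq_zero (Nat.le_zero.mp hp)
          subst this
          rw [pvLoopB_nil, pvLoopA_nil g infl (pvNil_cand g infl hinv)]
      | succ N2 ih =>
          intro pending hp hinv
          cases pending with
          | nil =>
              rw [pvLoopB_nil, pvLoopA_nil g infl (pvNil_cand g infl hinv)]
          | cons e rest =>
              by_cases hfr : infl.get? e.2.2 = some e.1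
              · -- fresh pop: one full round of A
                obtain ⟨hc, hhead⟩ := pvFresh_head g infl e rest hinv hfr
                rw [pvLoopB_fresh g infl e rest hfr, pvLoopA_cons g infl hc, hhead]
                have hinv' : pvInv g (infl.erase e.2.2) rest := pvErase_inv g infl e rest hinv
                have hinv'' := pvFoldDecPush_inv g (g.getD e.2.2 []) (infl.erase e.2.2, rest) hinv'
                have hfst := pvFoldDecPush_fst g (g.getD e.2.2 []) (infl.erase e.2.2, rest)
                rw [← hfst]
                apply ihA _ _ _ _ le_rfl hinv''
                -- the new dict is strictly smaller
                rw [hfst, pvFoldDecA_length]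
                show (infl.erase e.2.2).items.length ≤ N1
                have : (infl.erase e.2.2).items.length < infl.items.length :=
                  pvErase_length_lt infl e.2.2 (pvGet?_mem_keys infl e.2.2 e.1 hfr)
                omega
              · rw [pvLoopB_stale g infl e rest hfr]
                exact ih rest (by simpa using Nat.le_of_succ_le_succ hp)
                  (pvStale_inv g infl e rest hinv hfr)

-- floor(d/2) is nonnegative for a list length d
theorem pvFloorHalf_nonneg (n : Nat) : 0 ≤ PySem.Int.floordiv (n : Int) 2 := by
  rw [PySem.Int.floordiv_eq_ediv_of_pos (by norm_num)]
  exact Int.ediv_nonneg (by positivity) (by norm_num)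

-- d//2 = d - ceil(d/2)
theorem pvArith (n : Nat) :
    PySem.Int.floordiv (n : Int) 2 = (n : Int) - pvCeilHalf (n : Int) := by
  unfold pvCeilHalf
  rw [PySem.Int.floordiv_eq_ediv_of_pos (by norm_num), PySem.Int.floordiv_eq_ediv_of_pos (by norm_num)]
  omega

-- B's initial loop establishes the invariant
theorem pvInit_inv (g : PySem.Dict Int (List Int)) (hnd : g.keys.Nodup) :
    ∀ (l : List (Int × List Int)), (∀ kv ∈ l, kv ∈ g.items) →
    ∀ (s : PySem.Dict Int Int × List (Int × Int × Int)), pvInv g s.1 s.2 →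
    pvInv g
      (l.foldl (fun s kv =>
        (s.1.insert kv.1 (PySem.Int.floordiv (kv.2.length : Int) 2),
         pvPush s.2 (PySem.Int.floordiv (kv.2.length : Int) 2, (kv.2.length : Int), kv.1))) s).1
      (l.foldl (fun s kv =>
        (s.1.insert kv.1 (PySem.Int.floordiv (kv.2.length : Int) 2),
         pvPush s.2 (PySem.Int.floordiv (kv.2.length : Int) 2, (kv.2.length : Int), kv.1))) s).2 := by
  intro l
  induction l with
  | nil => intro _ s h; exact h
  | cons kv l ih =>
      intro hsub s h
      rw [List.foldl_cons]
      apply ih (fun x hx => hsub x (List.mem_cons_of_mem _ hx))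
      obtain ⟨hnd', hsort, hprops, hfresh⟩ := h
      have hdg : g.getD kv.1 [] = kv.2 :=
        PySem.Dict.getD_of_mem_items g (hsub kv List.mem_cons_self) hnd []
      refine ⟨?_, pvPush_pairwise _ _ hsort, ?_, ?_⟩
      · exact PySem.Dict.nodup_keys_insert _ _ _ hnd'
      · intro e he
        rcases (pvPush_mem _ _ e).mp he with he' | rfl
        · exact hprops e he'
        · exact ⟨by simp [hdg], pvFloorHalf_nonneg _⟩
      · intro kv' hkv' h0
        rcases (PySem.Dict.mem_items_insert _ _ _ _).mp hkv' with rfl | ⟨hmem, _⟩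
        · apply (pvPush_mem _ _ _).mpr
          right
          simp [hdg]
        · exact (pvPush_mem _ _ _).mpr (Or.inl (hfresh kv' hmem h0))

-- the dict component of B's initial loop is a plain insert fold
theorem pvInitFold_fst (l : List (Int × List Int))
    (s : PySem.Dict Int Int × List (Int × Int × Int)) :
    (l.foldl (fun s kv =>
      (s.1.insert kv.1 (PySem.Int.floordiv (kv.2.length : Int) 2),
       pvPush s.2 (PySem.Int.floordiv (kv.2.length : Int) 2, (kv.2.length : Int), kv.1))) s).1
    = l.foldl (fun d kv => d.insert kv.1 (PySem.Int.floordiv (kv.2.length : Int) 2)) s.1 := by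
  induction l generalizing s with
  | nil => rfl
  | cons kv l ih => rw [List.foldl_cons, List.foldl_cons, ih]

-- ===== VERDICT (by name: the statement is the Claim_ definition above) =====
theorem find_influencers_spec : Claim_equal_find_influencers := by
  intro graph _
  unfold Spec_find_influencers find_influencers find_influencers_alt
  simp only []
  set g := PySem.Dict.ofList graph with hg
  set s := g.items.foldl
    (fun (s : PySem.Dict Int Int × List (Int × Int × Int)) kv =>
      (s.1.insert kv.1 (PySem.Int.floordiv (kv.2.length : Int) 2),
       pvPush s.2 (PySem.Int.floordiv (kv.2.length : Int) 2, (kv.2.length : Int), kv.1)))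
    (PySem.Dict.empty, []) with hs
  have hA : g.items.foldl
      (fun d kv => d.insert kv.1 ((kv.2.length : Int) - pvCeilHalf (kv.2.length : Int)))
      PySem.Dict.empty = s.1 := by
    rw [hs, pvInitFold_fst]
    have : (fun (d : PySem.Dict Int Int) (kv : Int × List Int) =>
        d.insert kv.1 ((kv.2.length : Int) - pvCeilHalf (kv.2.length : Int)))
      = (fun (d : PySem.Dict Int Int) (kv : Int × List Int) =>
        d.insert kv.1 (PySem.Int.floordiv (kv.2.length : Int) 2)) := by
      funext d kv
      rw [pvArith]
    rw [this]
  rw [hA]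
  have hinv : pvInv g s.1 s.2 := by
    rw [hs]
    exact pvInit_inv g (PySem.Dict.nodup_keys_ofList graph) g.items (fun _ h => h)
      (PySem.Dict.empty, []) ⟨List.nodup_nil, List.Pairwise.nil, by simp, by simp [PySem.Dict.empty]⟩
  exact (pvSim g s.1.items.length s.1 le_rfl s.2.length s.2 le_rfl hinv).symm
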